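-- pv_equiv track=rewrite | github.com/zhangtai/teck | Teck/utils/buttons.py | get_pressed_buttons_states
-- ===== SOURCE A (Python) =====
-- def position_to_index(
--     position: tuple[int, int], layout: tuple[int, int] = (3, 5)
-- ) -> int:
--     return (position[0] - 1) * layout[1] + position[1] - 1
--
-- def get_pressed_buttons_states(
--     pressed_buttons: list[tuple[int, int]], layout: tuple[int, int] = (3, 5)
-- ) -> list[bool]:
--     stats = [False] * layout[0] * layout[1]
--     for i in range(layout[0] * layout[1]):
--         for button in pressed_buttons:
--             if position_to_index(button) == i:
--                 stats[i] = True
--     return stats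
-- ===== SOURCE B (Python) =====
-- def position_to_index(
--     position: tuple[int, int], layout: tuple[int, int] = (3, 5)
-- ) -> int:
--     return (position[0] - 1) * layout[1] + position[1] - 1
--
--
-- def get_pressed_buttons_states(
--     pressed_buttons: list[tuple[int, int]], layout: tuple[int, int] = (3, 5)
-- ) -> list[bool]:
--     # One pass over the pressed buttons, writing directly into the state list
--     # (A’s inner call indexes with the default layout argument, reproduced here); out-of-range indices are dropped.
--     states = [False] * layout[0] * layout[1]
--     for button in pressed_buttons:
--         i = position_to_index(button)
--         if 0 <= i < len(states):
--             states[i] = True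
--     return states
-- ===== Notes on version B (the rewrite author's own statement) =====
-- stated objective: faster
-- what changed: B makes one pass over the pressed buttons, writing each computed index directly into the preallocated state list with a bounds guard, instead of A's nested loops that rescan every pressed button for every grid cell.
-- outside the precondition, e.g. on get_pressed_buttons_states([(1,)], (0, 5)): A returns [], B raises IndexError
import Mathlib
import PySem

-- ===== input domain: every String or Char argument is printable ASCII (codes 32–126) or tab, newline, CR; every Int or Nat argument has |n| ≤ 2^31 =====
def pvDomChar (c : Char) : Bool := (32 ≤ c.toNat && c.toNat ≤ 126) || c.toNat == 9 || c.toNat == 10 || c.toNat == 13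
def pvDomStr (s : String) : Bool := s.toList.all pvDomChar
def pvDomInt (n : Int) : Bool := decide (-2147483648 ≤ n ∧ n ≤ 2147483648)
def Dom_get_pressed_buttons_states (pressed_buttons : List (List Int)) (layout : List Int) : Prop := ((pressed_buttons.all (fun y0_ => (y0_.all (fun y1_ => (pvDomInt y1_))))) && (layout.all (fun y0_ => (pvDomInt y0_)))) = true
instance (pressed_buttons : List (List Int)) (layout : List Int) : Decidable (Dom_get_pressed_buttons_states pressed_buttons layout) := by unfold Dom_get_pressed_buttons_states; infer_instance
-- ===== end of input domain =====

-- B replaces A's per-cell rescan of all pressed buttons (nested loops) by a single pass over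
-- the buttons writing each computed index into the preallocated state list (objective: faster).

-- ===== PORT A =====
-- helper of A; list indexing via pyGetD (default 0 is unreachable inside Pre_, where both lists have length ≥ 2)
def position_to_index (position : List Int) (layout : List Int) : Int :=
  (PySem.List.pyGetD position 0 0 - 1) * PySem.List.pyGetD layout 1 0
    + PySem.List.pyGetD position 1 0 - 1

def get_pressed_buttons_states (pressed_buttons : List (List Int)) (layout : List Int) : List Bool :=
  let l0 := PySem.List.pyGetD layout 0 0
  let l1 := PySem.List.pyGetD layout 1 0
  let stats := List.replicate (l0.toNat * l1.toNat) false   -- [False] * layout[0] * layout[1]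
  (PySem.List.pyRange 0 (l0 * l1) 1).foldl
    (fun stats i =>
      pressed_buttons.foldl
        (fun stats button =>
          -- A calls position_to_index(button), leaving its layout parameter at its default
          if position_to_index button [3, 5] == i then stats.set i.toNat true else stats)
        stats)
    stats

-- ===== PORT B =====
def get_pressed_buttons_states_alt (pressed_buttons : List (List Int)) (layout : List Int) : List Bool :=
  let states := List.replicate
    ((PySem.List.pyGetD layout 0 0).toNat * (PySem.List.pyGetD layout 1 0).toNat) false
  pressed_buttons.foldl
    (fun states button =>
      let i := position_to_index button [3, 5]
      if 0 ≤ i ∧ i < (states.length : Int) then states.set i.toNat true else states)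
    states

-- ===== PRECONDITION & SPEC =====
-- Pre_ excludes exactly the inputs on which Python A raises IndexError — a layout or a button
-- with fewer than two entries, or a button whose index falls between the preallocated list's
-- length and the grid product (possible only when both layout dimensions are negative) — plus
-- buttons with fewer than two coordinates under an empty grid, where A never reads them and returns
-- the empty state list while B's single pass naturally raises.
def Pre_get_pressed_buttons_states (pressed_buttons : List (List Int)) (layout : List Int) : Prop :=
  2 ≤ layout.length ∧ (∀ b ∈ pressed_buttons, 2 ≤ b.length) ∧
    ∀ b ∈ pressed_buttons,
      ¬ ((((PySem.List.pyGetD layout 0 0).toNat * (PySem.List.pyGetD layout 1 0).toNat : Nat) : Int)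
            ≤ (PySem.List.pyGetD b 0 0 - 1) * 5 + PySem.List.pyGetD b 1 0 - 1
         ∧ (PySem.List.pyGetD b 0 0 - 1) * 5 + PySem.List.pyGetD b 1 0 - 1
            < PySem.List.pyGetD layout 0 0 * PySem.List.pyGetD layout 1 0)
instance (pressed_buttons : List (List Int)) (layout : List Int) : Decidable (Pre_get_pressed_buttons_states pressed_buttons layout) := by unfold Pre_get_pressed_buttons_states; infer_instance

def pvWitness_get_pressed_buttons_states : List (List Int) × List Int := ([[1, 2], [3, 5]], [3, 5])

def Spec_get_pressed_buttons_states (pressed_buttons : List (List Int)) (layout : List Int) (out : List Bool) : Prop := out = get_pressed_buttons_states_alt pressed_buttons layout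
instance (pressed_buttons : List (List Int)) (layout : List Int) (out : List Bool) : Decidable (Spec_get_pressed_buttons_states pressed_buttons layout out) := by unfold Spec_get_pressed_buttons_states; infer_instance

-- ===== CLAIM (what is proved, stated in full; the proofs are below) =====
def Claim_equal_get_pressed_buttons_states : Prop := ∀ (pressed_buttons : List (List Int)) (layout : List Int), Dom_get_pressed_buttons_states pressed_buttons layout → Pre_get_pressed_buttons_states pressed_buttons layout → Spec_get_pressed_buttons_states pressed_buttons layout (get_pressed_buttons_states pressed_buttons layout)

-- ===== LEMMAS AND PROOFS =====

-- inner loop of A: scanning all buttons and setting cell k on a match = one conditional set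
theorem inner_foldl_eq (bs : List (List Int)) (i : Int) (k : Nat) (s : List Bool) :
    bs.foldl (fun s b => if position_to_index b [3, 5] == i then s.set k true else s) s
      = if bs.any (fun b => position_to_index b [3, 5] == i) then s.set k true else s := by
  induction bs generalizing s with
  | nil => simp
  | cons b bs ih =>
    rw [List.foldl_cons, List.any_cons]
    by_cases h : (position_to_index b [3, 5] == i) = true
    · rw [if_pos h, ih, List.set_set]
      simp [h]
    · rw [if_neg h, ih, Bool.eq_false_iff.mpr h, Bool.false_or]

theorem outer_length (P : Int → Bool) (l : List Int) (s : List Bool) :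
    (l.foldl (fun s i => if P i then s.set i.toNat true else s) s).length = s.length := by
  induction l generalizing s with
  | nil => rfl
  | cons i l ih =>
    rw [List.foldl_cons, ih]
    by_cases h : P i <;> simp [h]

theorem outer_getElem? (P : Int → Bool) :
    ∀ (l : List Int) (s : List Bool) (k : Nat), (∀ i ∈ l, 0 ≤ i) → k < s.length →
    (l.foldl (fun s i => if P i then s.set i.toNat true else s) s)[k]?
      = if (k : Int) ∈ l ∧ P (k : Int) then some true else s[k]? := by
  intro l
  induction l with
  | nil => intro s k _ _; simp
  | cons i l ih =>
    intro s k hl hk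
    have hi0 : 0 ≤ i := hl i (List.mem_cons_self ..)
    have hl' : ∀ j ∈ l, 0 ≤ j := fun j hj => hl j (List.mem_cons_of_mem _ hj)
    rw [List.foldl_cons]
    have hlen : (if P i then s.set i.toNat true else s).length = s.length := by
      by_cases h : P i <;> simp [h]
    rw [ih _ k hl' (by rw [hlen]; exact hk)]
    by_cases hik : i = (k : Int)
    · rw [hik]
      by_cases hP : P (k : Int)
      · simp [hP, hk, List.mem_cons]
      · simp [hP, List.mem_cons]
    · have htn : ¬ (i.toNat = k) := by omega
      have hki : ¬ ((k : Int) = i) := fun h => hik h.symm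
      by_cases hP : P i
      · simp [hP, htn, hki, List.mem_cons]
      · simp [hP, hki, List.mem_cons]

-- B's single pass preserves the length of the state list
theorem alt_length (f : List Int → Int) :
    ∀ (bs : List (List Int)) (s : List Bool),
    (bs.foldl (fun s b =>
        if 0 ≤ f b ∧ f b < (s.length : Int) then s.set (f b).toNat true else s) s).length
      = s.length := by
  intro bs
  induction bs with
  | nil => intro s; rfl
  | cons b bs ih =>
    intro s
    rw [List.foldl_cons, ih]
    by_cases h : 0 ≤ f b ∧ f b < (s.length : Int) <;> simp [h]

-- entry k of B's single pass: true iff some button hits cell k, else the initial entry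
theorem alt_getElem? (f : List Int → Int) :
    ∀ (bs : List (List Int)) (s : List Bool) (k : Nat), k < s.length →
    (bs.foldl (fun s b =>
        if 0 ≤ f b ∧ f b < (s.length : Int) then s.set (f b).toNat true else s) s)[k]?
      = if bs.any (fun b => f b == (k : Int)) then some true else s[k]? := by
  intro bs
  induction bs with
  | nil => intro s k _; simp
  | cons b bs ih =>
    intro s k hk
    rw [List.foldl_cons, List.any_cons]
    have hstep : (if 0 ≤ f b ∧ f b < (s.length : Int) then s.set (f b).toNat true else s).length
        = s.length := by
      by_cases h : 0 ≤ f b ∧ f b < (s.length : Int) <;> simp [h]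
    rw [ih _ k (by rw [hstep]; exact hk)]
    by_cases hfb : f b = (k : Int)
    · have hg : 0 ≤ f b ∧ f b < (s.length : Int) := by
        constructor
        · rw [hfb]; exact Int.natCast_nonneg k
        · rw [hfb]; exact_mod_cast hk
      have ht : (f b).toNat = k := by omega
      rw [if_pos hg, ht]
      simp [hfb, hk]
    · have hne : ¬ ((f b == (k : Int)) = true) := by simp [hfb]
      rw [Bool.eq_false_iff.mpr hne, Bool.false_or]
      by_cases hg : 0 ≤ f b ∧ f b < (s.length : Int)
      · have htn : ¬ ((f b).toNat = k) := by omega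
        simp [hg, htn]
      · simp [hg]

-- ===== VERDICT (by name: the statement is the Claim_ definition above) =====
theorem get_pressed_buttons_states_spec : Claim_equal_get_pressed_buttons_states := by
  intro pressed_buttons layout _hd _hpre
  unfold Spec_get_pressed_buttons_states get_pressed_buttons_states get_pressed_buttons_states_alt
  set l0 := PySem.List.pyGetD layout 0 0 with hl0
  set l1 := PySem.List.pyGetD layout 1 0 with hl1
  set P : Int → Bool :=
    fun i => pressed_buttons.any (fun b => position_to_index b [3, 5] == i) with hP
  have hfun : (fun (stats : List Bool) (i : Int) =>
        pressed_buttons.foldl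
          (fun stats button =>
            if position_to_index button [3, 5] == i then stats.set i.toNat true else stats)
          stats)
      = (fun (s : List Bool) (i : Int) => if P i then s.set i.toNat true else s) := by
    funext s i
    exact inner_foldl_eq pressed_buttons i i.toNat s
  rw [hfun]
  apply List.ext_getElem?
  intro k
  have hlenA : ((PySem.List.pyRange 0 (l0 * l1) 1).foldl
      (fun s i => if P i then s.set i.toNat true else s)
      (List.replicate (l0.toNat * l1.toNat) false)).length = l0.toNat * l1.toNat := by
    rw [outer_length]; simp
  have hlenB : (pressed_buttons.foldl
      (fun states button =>
        if 0 ≤ position_to_index button [3, 5] ∧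
            position_to_index button [3, 5] < (states.length : Int)
          then states.set (position_to_index button [3, 5]).toNat true else states)
      (List.replicate (l0.toNat * l1.toNat) false)).length = l0.toNat * l1.toNat := by
    rw [alt_length (fun b => position_to_index b [3, 5])]; simp
  by_cases hk : k < l0.toNat * l1.toNat
  · have ha : 0 < l0.toNat := by
      rcases Nat.eq_zero_or_pos l0.toNat with h | h
      · rw [h, Nat.zero_mul] at hk; exact absurd hk (by omega)
      · exact h
    have hb1 : 0 < l1.toNat := by
      rcases Nat.eq_zero_or_pos l1.toNat with h | h
      · rw [h, Nat.mul_zero] at hk; exact absurd hk (by omega)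
      · exact h
    have hklt : (k : Int) < l0 * l1 := by
      have hcast := (Nat.cast_lt (α := Int)).mpr hk
      rwa [Nat.cast_mul, Int.toNat_of_nonneg (by omega), Int.toNat_of_nonneg (by omega)] at hcast
    have hkmem : (k : Int) ∈ PySem.List.pyRange 0 (l0 * l1) 1 := by
      rw [PySem.List.mem_pyRange_one]
      exact ⟨Int.natCast_nonneg k, hklt⟩
    rw [outer_getElem? P _ _ k (fun i hi => ((PySem.List.mem_pyRange_one).1 hi).1)
        (by simp [hk]),
      alt_getElem? (fun b => position_to_index b [3, 5]) _ _ k (by simp [hk])]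
    by_cases hPk : P (k : Int) = true
    · simp [hkmem, hP ▸ hPk, hPk]
    · simp [hkmem, hPk, hP ▸ hPk]
  · rw [List.getElem?_eq_none (by rw [hlenA]; omega),
        List.getElem?_eq_none (by rw [hlenB]; omega)]
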